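-- pv_equiv track=rewrite | github.com/samuelchen17/leetcode | coderbyte/easy/question_marks.py | QuestionsMarksNew
-- ===== SOURCE A (Python) =====
-- def QuestionsMarksNew(strParam):
--     """
--     create hashmap
--     iterate through string
--     if number
--       difference = 10 - number
--       if difference in hashmap
--         grab the array beginning from hashmap index to current index
--         loop through to count question marks
--         if at end
--         if count != 3
--           return False
--         else:
--           pairfound = true
--       save to hashmap
--       key = value, value = index
--     Return pairfound
--     """
--     hashmap = {}
--     pair_found = False
--
--     for i, char in enumerate(strParam):
--         if char.isnumeric():
--             num = int(char)
--             difference = 10 - num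
--             if difference in hashmap:
--                 count = 0
--                 subStr = strParam[hashmap[difference] : i]
--                 for char in subStr:
--                     if char == "?":
--                         count += 1
--                 if count != 3:
--                     return False
--                 else:
--                     pair_found = True
--             hashmap[num] = i
--     return pair_found
-- ===== SOURCE B (Python) =====
-- def QuestionsMarksNew(strParam):
--     # One pass: keep a running count of '?' seen so far; for each digit remember
--     # the running count at its position, so the '?'s between two digits is a
--     # difference of counters (no substring scan).
--     last = {}
--     q = 0
--     pair_found = False
--     for ch in strParam:
--         if ch.isnumeric():
--             d = int(ch)
--             prev = last.get(10 - d)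
--             if prev is not None:
--                 if q - prev != 3:
--                     return False
--                 pair_found = True
--             last[d] = q
--         elif ch == "?":
--             q += 1
--     return pair_found
-- ===== Notes on version B (the rewrite author's own statement) =====
-- stated objective: alternative
-- what changed: Replaces the per-pair substring slice-and-scan with a single pass that carries a running '?' counter and stores, per digit, the counter value at its position, so the number of '?' between two digits is a counter difference.
import Mathlib
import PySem

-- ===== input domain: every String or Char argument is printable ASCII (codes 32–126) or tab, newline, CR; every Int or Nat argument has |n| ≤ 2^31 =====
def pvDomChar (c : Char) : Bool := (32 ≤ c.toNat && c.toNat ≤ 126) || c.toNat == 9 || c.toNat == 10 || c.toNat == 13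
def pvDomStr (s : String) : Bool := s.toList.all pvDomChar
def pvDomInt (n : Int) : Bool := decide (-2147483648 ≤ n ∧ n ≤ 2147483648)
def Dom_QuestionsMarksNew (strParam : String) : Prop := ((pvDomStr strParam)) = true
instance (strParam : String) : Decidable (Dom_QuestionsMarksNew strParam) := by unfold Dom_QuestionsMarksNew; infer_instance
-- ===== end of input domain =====

-- B replaces A's per-pair substring slice-and-scan by one pass with a running '?' counter and per-digit counter snapshots (alternative algorithm).


-- ===== PORT A =====
-- char.isnumeric: on the printable-ASCII domain this is exactly '0'..'9'
def pvIsNum (c : Char) : Bool := decide ('0' ≤ c ∧ c ≤ '9')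

-- the inner 'for char in subStr: if char == "?": count += 1' loop
def pvCountQ (l : List Char) : Int := l.foldl (fun a c => if c = '?' then a + 1 else a) 0

-- the 'for i, char in enumerate(strParam)' loop, as structural recursion on the rest
-- of the string with the running index i; early 'return False' is a direct result.
def pvLoopA (s : List Char) (rest : List Char) (i : Nat) (hm : PySem.Dict Int Int) (pf : Bool) : Bool :=
  match rest with
  | [] => pf
  | char :: rest' =>
    if pvIsNum char then
      let num : Int := (char.toNat : Int) - 48   -- int(char), exact for an ASCII digit
      let diff : Int := 10 - num
      match PySem.Dict.get? hm diff with
      | some j =>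
        let count := pvCountQ (PySem.List.slice s (some j) (some (i : Int)))
        if count ≠ 3 then false
        else pvLoopA s rest' (i + 1) (PySem.Dict.insert hm num (i : Int)) true
      | none => pvLoopA s rest' (i + 1) (PySem.Dict.insert hm num (i : Int)) pf
    else pvLoopA s rest' (i + 1) hm pf

def QuestionsMarksNew (strParam : String) : Bool :=
  pvLoopA strParam.toList strParam.toList 0 PySem.Dict.empty false

-- ===== PORT B =====
-- single pass: q = running count of '?' so far; last stores, per digit, q at its position
def pvLoopB (rest : List Char) (lq : PySem.Dict Int Int) (q : Int) (pf : Bool) : Bool :=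
  match rest with
  | [] => pf
  | ch :: rest' =>
    if pvIsNum ch then
      let d : Int := (ch.toNat : Int) - 48
      match PySem.Dict.get? lq (10 - d) with
      | some prev =>
        if q - prev ≠ 3 then false
        else pvLoopB rest' (PySem.Dict.insert lq d q) q true
      | none => pvLoopB rest' (PySem.Dict.insert lq d q) q pf
    else if ch = '?' then pvLoopB rest' lq (q + 1) pf
    else pvLoopB rest' lq q pf

def QuestionsMarksNew_alt (strParam : String) : Bool :=
  pvLoopB strParam.toList PySem.Dict.empty 0 false

-- ===== PRECONDITION & SPEC =====
def Spec_QuestionsMarksNew (strParam : String) (out : Bool) : Prop := out = QuestionsMarksNew_alt strParam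
instance (strParam : String) (out : Bool) : Decidable (Spec_QuestionsMarksNew strParam out) := by unfold Spec_QuestionsMarksNew; infer_instance

-- ===== CLAIM (what is proved, stated in full; the proofs are below) =====
def Claim_equal_QuestionsMarksNew : Prop := ∀ (strParam : String), Dom_QuestionsMarksNew strParam → Spec_QuestionsMarksNew strParam (QuestionsMarksNew strParam)

-- ===== LEMMAS AND PROOFS =====

-- '?'-count of a prefix, the value B's counter tracks
def pvCnt (l : List Char) : Int := (l.countP (fun c => c = '?') : Nat)

lemma pvCountQ_acc (l : List Char) : ∀ a : Int,
    l.foldl (fun a c => if c = '?' then a + 1 else a) a = a + pvCnt l := by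
  induction l with
  | nil => intro a; simp [pvCnt]
  | cons c l ih =>
    intro a
    by_cases h : c = '?' <;> simp [pvCnt, h, ih]; ring

lemma pvCountQ_eq (l : List Char) : pvCountQ l = pvCnt l := by
  simpa using pvCountQ_acc l 0

lemma pvCnt_append (l₁ l₂ : List Char) : pvCnt (l₁ ++ l₂) = pvCnt l₁ + pvCnt l₂ := by
  simp [pvCnt, List.countP_append]

-- the states of the two loops correspond
def pvInv (s : List Char) (i : Nat) (hm lq : PySem.Dict Int Int) : Prop :=
  ∀ d : Int, (PySem.Dict.get? hm d = none ∧ PySem.Dict.get? lq d = none) ∨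
    ∃ jn : Nat, jn ≤ i ∧ PySem.Dict.get? hm d = some (jn : Int) ∧
      PySem.Dict.get? lq d = some (pvCnt (s.take jn))

lemma pvInv_insert (s : List Char) (i : Nat) (hm lq : PySem.Dict Int Int)
    (h : pvInv s i hm lq) (k : Int) :
    pvInv s (i + 1) (PySem.Dict.insert hm k (i : Int)) (PySem.Dict.insert lq k (pvCnt (s.take i))) := by
  intro d
  rw [PySem.Dict.get?_insert, PySem.Dict.get?_insert]
  by_cases hd : d = k
  · exact Or.inr ⟨i, by omega, by simp [hd], by simp [hd]⟩
  · simp only [if_neg hd]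
    rcases h d with h' | ⟨jn, hjn, h1, h2⟩
    · exact Or.inl h'
    · exact Or.inr ⟨jn, by omega, h1, h2⟩

lemma pvTake_succ (s : List Char) (i : Nat) (c : Char) (rest' : List Char)
    (h : s.drop i = c :: rest') : s.take (i + 1) = s.take i ++ [c] := by
  have hi : i < s.length := by
    by_contra hle
    simp [List.drop_eq_nil_of_le (by omega : s.length ≤ i)] at h
  have hd := List.drop_eq_getElem_cons hi
  rw [h] at hd
  have hc : c = s[i] := by injection hd
  rw [List.take_add_one]
  simp [List.getElem?_eq_getElem hi, ← hc]

lemma pvLoop_eq (s : List Char) : ∀ (rest : List Char) (i : Nat)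
    (hm lq : PySem.Dict Int Int) (pf : Bool),
    rest = s.drop i → pvInv s i hm lq →
    pvLoopA s rest i hm pf = pvLoopB rest lq (pvCnt (s.take i)) pf := by
  intro rest
  induction rest with
  | nil => intro i hm lq pf _ _; simp [pvLoopA, pvLoopB]
  | cons c rest' ih =>
    intro i hm lq pf hrest hinv
    have htake : s.take (i + 1) = s.take i ++ [c] := pvTake_succ s i c rest' hrest.symm
    have hrest' : rest' = s.drop (i + 1) := by
      have := congrArg List.tail hrest
      simpa [List.tail_drop] using this
    by_cases hnum : pvIsNum c = true
    · -- c is a digit, hence not '?'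
      have hcq : c ≠ '?' := by
        intro hc; rw [hc] at hnum
        exact absurd hnum (by decide)
      have hcnt : pvCnt (s.take (i + 1)) = pvCnt (s.take i) := by
        simp [htake, pvCnt, hcq]
      rcases hinv (10 - ((c.toNat : Int) - 48)) with ⟨h1, h2⟩ | ⟨jn, hjn, h1, h2⟩
      · simp only [pvLoopA, pvLoopB, hnum, if_pos, h1, h2]
        rw [ih (i + 1) _ _ pf hrest' (by simpa [hcnt] using pvInv_insert s i hm lq hinv _)]
        rw [hcnt]
      · -- both find the partner digit
        have hslice : pvCountQ (PySem.List.slice s (some ((jn : Nat) : Int)) (some (i : Int)))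
            = pvCnt (s.take i) - pvCnt (s.take jn) := by
          rw [pvCountQ_eq, PySem.List.slice_natCast]
          have hsplit : s.take i = s.take jn ++ (s.drop jn).take (i - jn) := by
            rw [← List.take_append_drop jn (s.take i)]
            congr 1
            · simp [List.take_take, Nat.min_eq_left hjn]
            · rw [List.drop_take]
          have := congrArg pvCnt hsplit
          rw [pvCnt_append] at this
          omega
        simp only [pvLoopA, pvLoopB, hnum, if_pos, h1, h2, hslice]
        by_cases h3 : pvCnt (s.take i) - pvCnt (s.take jn) ≠ 3
        · simp [h3]
        · simp only [h3]
          simp only [not_not] at h3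
          rw [ih (i + 1) _ _ true hrest' (by simpa [hcnt] using pvInv_insert s i hm lq hinv _)]
          rw [hcnt]
    · -- not a digit
      have hinv' : pvInv s (i + 1) hm lq := by
        intro d
        rcases hinv d with h' | ⟨jn, hjn, h1, h2⟩
        · exact Or.inl h'
        · exact Or.inr ⟨jn, by omega, h1, h2⟩
      have hnum' : pvIsNum c = false := by simpa using hnum
      simp only [pvLoopA, pvLoopB, hnum', Bool.false_eq_true, if_false]
      by_cases hq : c = '?'
      · have hcnt : pvCnt (s.take (i + 1)) = pvCnt (s.take i) + 1 := by
          simp [htake, pvCnt, hq]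
        rw [if_pos hq, ih (i + 1) hm lq pf hrest' hinv', hcnt]
      · have hcnt : pvCnt (s.take (i + 1)) = pvCnt (s.take i) := by
          simp [htake, pvCnt, hq]
        rw [if_neg hq, ih (i + 1) hm lq pf hrest' hinv', hcnt]

-- ===== VERDICT (by name: the statement is the Claim_ definition above) =====
theorem QuestionsMarksNew_spec : Claim_equal_QuestionsMarksNew := by
  intro strParam _
  unfold Spec_QuestionsMarksNew QuestionsMarksNew QuestionsMarksNew_alt
  have := pvLoop_eq strParam.toList strParam.toList 0 PySem.Dict.empty PySem.Dict.empty false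
    (by simp) (by intro d; exact Or.inl ⟨by simp, by simp⟩)
  simpa [pvCnt] using this
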